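-- pv_equiv track=rewrite | github.com/mmarcos05/Guia3conMartu | Luli/guia7Luli.py | tiene_num
-- ===== SOURCE A (Python) =====
-- def tiene_num(contraseña:str) -> bool:
--     indice: int = 0
--     condicion: bool = True
--     while indice < len (contraseña):
--         if (contraseña[indice] >= "0") and (contraseña[indice] <= "9"):
--             return condicion
--         else:
--             indice += 1
--     return False
-- ===== SOURCE B (Python) =====
-- def tiene_num(contraseña: str) -> bool:
--     return bool(set(contraseña) & set("0123456789"))
-- ===== Notes on version B (the rewrite author's own statement) =====
-- stated objective: idiomatic
-- what changed: Replaces the positional while-loop with early return by materialising the string's character set and intersecting it with the ASCII digit set; the per-character work moves from interpreted index/compare steps into C-level set construction.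
import Mathlib
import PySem

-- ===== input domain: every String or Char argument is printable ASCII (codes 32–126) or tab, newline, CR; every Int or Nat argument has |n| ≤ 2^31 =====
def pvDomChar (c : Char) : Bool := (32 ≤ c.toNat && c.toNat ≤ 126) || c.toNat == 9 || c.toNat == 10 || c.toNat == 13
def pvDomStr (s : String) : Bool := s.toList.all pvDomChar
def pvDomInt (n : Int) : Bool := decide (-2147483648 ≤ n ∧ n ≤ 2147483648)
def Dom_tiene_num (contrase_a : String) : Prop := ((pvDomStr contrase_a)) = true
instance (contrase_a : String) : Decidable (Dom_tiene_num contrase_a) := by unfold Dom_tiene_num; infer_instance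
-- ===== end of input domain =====

-- B replaces A's positional while-loop (scan with early return) by an idiomatic set-overlap
-- test: set(contraseña) & set("0123456789") is nonempty.


-- ===== PORT A =====
-- the while-loop: indice scans the string; returns True at the first ASCII-digit character
def tieneNumLoop (cs : List Char) (indice : Nat) : Bool :=
  if h : indice < cs.length then
    if '0' ≤ cs[indice] && cs[indice] ≤ '9' then true
    else tieneNumLoop cs (indice + 1)
  else false
termination_by cs.length - indice

def tiene_num (contrase_a : String) : Bool := tieneNumLoop contrase_a.toList 0

-- ===== PORT B =====
def tiene_num_alt (contrase_a : String) : Bool :=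
  !(PySem.Set.inter (PySem.Set.ofList contrase_a.toList)
      (PySem.Set.ofList "0123456789".toList)).isEmpty

-- ===== PRECONDITION & SPEC =====
def Spec_tiene_num (contrase_a : String) (out : Bool) : Prop := out = tiene_num_alt contrase_a
instance (contrase_a : String) (out : Bool) : Decidable (Spec_tiene_num contrase_a out) := by unfold Spec_tiene_num; infer_instance

-- ===== CLAIM (what is proved, stated in full; the proofs are below) =====
def Claim_equal_tiene_num : Prop := ∀ (contrase_a : String), Dom_tiene_num contrase_a → Spec_tiene_num contrase_a (tiene_num contrase_a)

-- ===== LEMMAS AND PROOFS =====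

lemma mem_digits (c : Char) : (c ∈ ("0123456789".toList)) ↔ ('0' ≤ c ∧ c ≤ '9') := by
  have e : "0123456789".toList = ['0','1','2','3','4','5','6','7','8','9'] := by decide
  rw [e]
  constructor
  · intro h
    fin_cases h <;> exact ⟨by decide, by decide⟩
  · rintro ⟨h1, h2⟩
    have n1 : 48 ≤ c.toNat := h1
    have n2 : c.toNat ≤ 57 := h2
    have h : c.toNat = 48 ∨ c.toNat = 49 ∨ c.toNat = 50 ∨ c.toNat = 51 ∨ c.toNat = 52 ∨ c.toNat = 53 ∨ c.toNat = 54 ∨ c.toNat = 55 ∨ c.toNat = 56 ∨ c.toNat = 57 := by omega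
    have hc : ∀ n, c.toNat = n → c = Char.ofNat n := by
      intro n hn; subst hn; exact (Char.ofNat_toNat c).symm
    rcases h with h|h|h|h|h|h|h|h|h|h <;> rw [hc _ h] <;> decide

lemma loop_eq_any (cs : List Char) (i : Nat) :
    tieneNumLoop cs i = (cs.drop i).any (fun c => '0' ≤ c && c ≤ '9') := by
  fun_induction tieneNumLoop cs i with
  | case1 i h hd =>
      simp only [Bool.and_eq_true, decide_eq_true_eq] at hd
      symm
      simp only [List.any_eq_true, decide_eq_true_eq, Bool.and_eq_true]
      exact ⟨cs[i], by rw [List.drop_eq_getElem_cons h]; exact List.mem_cons_self .., hd.1, hd.2⟩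
  | case2 i h hd ih =>
      have hfalse : ('0' ≤ cs[i] && cs[i] ≤ '9') = false := by
        cases hb : ('0' ≤ cs[i] && cs[i] ≤ '9') with
        | false => rfl
        | true => exact absurd hb hd
      rw [ih, List.drop_eq_getElem_cons h, List.any_cons, hfalse]
      simp
  | case3 i h =>
      rw [List.drop_eq_nil_of_le (by omega)]
      simp

lemma alt_eq_any (s : String) :
    tiene_num_alt s = s.toList.any (fun c => '0' ≤ c && c ≤ '9') := by
  rw [Bool.eq_iff_iff]
  simp only [tiene_num_alt, Bool.not_eq_true', List.isEmpty_eq_false_iff_exists_mem,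
    List.any_eq_true]
  constructor
  · rintro ⟨y, hy⟩
    have := (PySem.Set.mem_inter _ _ _).mp hy
    rcases this with ⟨h1, h2⟩
    refine ⟨y, (PySem.Set.mem_ofList _ _).mp h1, ?_⟩
    have := (mem_digits y).mp ((PySem.Set.mem_ofList _ _).mp h2)
    simp [this.1, this.2]
  · rintro ⟨c, hc, hd⟩
    refine ⟨c, (PySem.Set.mem_inter _ _ _).mpr ⟨(PySem.Set.mem_ofList _ _).mpr hc, (PySem.Set.mem_ofList _ _).mpr ?_⟩⟩
    simp at hd
    exact (mem_digits c).mpr ⟨hd.1, hd.2⟩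

-- ===== VERDICT (by name: the statement is the Claim_ definition above) =====
theorem tiene_num_spec : Claim_equal_tiene_num := by
  intro s _
  unfold Spec_tiene_num tiene_num
  rw [alt_eq_any, loop_eq_any]
  simp
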